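-- pv_equiv track=rewrite | github.com/dbian17/cs170proj | agglo.py | key_to_clusters
-- ===== SOURCE A (Python) =====
-- def key_to_clusters(clustering, home_indices_in_locations):
--     mydict = {}
--     for i in range(len(clustering)):
--         cluster = clustering[i]
--         if cluster in mydict:
--             mydict[cluster].append(home_indices_in_locations[i])
--         else:
--             mydict[cluster] = [home_indices_in_locations[i]]
--     alist = []
--     for key in mydict:
--         alist.append(mydict[key])
--     return alist
-- ===== SOURCE B (Python) =====
-- def key_to_clusters(clustering, home_indices_in_locations):
--     keys = []
--     for c in clustering:
--         if c not in keys: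
--             keys.append(c)
--     pairs = list(zip(clustering, home_indices_in_locations))
--     return [[h for c, h in pairs if c == k] for k in keys]
-- ===== Notes on version B (the rewrite author's own statement) =====
-- stated objective: alternative
-- what changed: Instead of A's single pass that maintains a dict of growing groups, B first collects the distinct cluster keys in first-appearance order and then builds each group by a separate filter pass over the zipped (cluster, home) pairs.
import Mathlib
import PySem

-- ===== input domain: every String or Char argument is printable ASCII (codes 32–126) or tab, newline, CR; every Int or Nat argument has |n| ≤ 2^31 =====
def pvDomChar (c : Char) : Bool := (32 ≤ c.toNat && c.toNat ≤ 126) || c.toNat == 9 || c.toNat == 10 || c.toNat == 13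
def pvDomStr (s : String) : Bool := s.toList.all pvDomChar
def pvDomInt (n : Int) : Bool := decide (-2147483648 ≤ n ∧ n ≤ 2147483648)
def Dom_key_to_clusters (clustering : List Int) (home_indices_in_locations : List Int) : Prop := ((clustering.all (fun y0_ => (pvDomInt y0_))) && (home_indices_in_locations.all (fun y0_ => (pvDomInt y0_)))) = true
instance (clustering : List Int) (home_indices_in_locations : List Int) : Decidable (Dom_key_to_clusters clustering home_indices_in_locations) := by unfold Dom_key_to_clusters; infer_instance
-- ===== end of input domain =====

-- B groups by first building the ordered list of distinct keys and then one filter pass per key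
-- (objective: alternative decomposition, same result; not claimed faster).

-- ===== PORT A =====
-- The two pyGetD defaults are never used inside Pre_ (0 ≤ i < len clustering ≤ len home);
-- outside Pre_ the Python raises IndexError, excluded by Pre_.  mydict[key] in the output
-- loop is ported as getD with [] — exact, since key ranges over mydict's keys.
def key_to_clusters (clustering : List Int) (home_indices_in_locations : List Int) : List (List Int) :=
  let mydict : PySem.Dict Int (List Int) :=
    (PySem.List.pyRange 0 (PySem.List.len clustering)).foldl
      (fun d i =>
        let cluster := PySem.List.pyGetD clustering i 0
        if d.contains cluster then
          d.modify cluster [] (fun l => l ++ [PySem.List.pyGetD home_indices_in_locations i 0])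
        else
          d.insert cluster [PySem.List.pyGetD home_indices_in_locations i 0]) PySem.Dict.empty
  mydict.keys.foldl (fun alist key => alist ++ [mydict.getD key []]) []

-- ===== PORT B =====
def key_to_clusters_alt (clustering : List Int) (home_indices_in_locations : List Int) : List (List Int) :=
  let keys := clustering.foldl (fun ks c => if ks.contains c then ks else ks ++ [c]) []
  let pairs := clustering.zip home_indices_in_locations
  keys.map (fun k => (pairs.filter (fun p => p.1 == k)).map (fun p => p.2))

-- ===== PRECONDITION & SPEC =====
-- A indexes home_indices_in_locations at every i < len(clustering) and raises IndexError
-- when that list is shorter; Pre_ admits exactly the inputs on which A returns.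
def Pre_key_to_clusters (clustering : List Int) (home_indices_in_locations : List Int) : Prop :=
  clustering.length ≤ home_indices_in_locations.length
instance (clustering : List Int) (home_indices_in_locations : List Int) : Decidable (Pre_key_to_clusters clustering home_indices_in_locations) := by unfold Pre_key_to_clusters; infer_instance
def pvWitness_key_to_clusters : List Int × List Int := ([1, 2, 1], [10, 20, 30])

def Spec_key_to_clusters (clustering : List Int) (home_indices_in_locations : List Int) (out : List (List Int)) : Prop := out = key_to_clusters_alt clustering home_indices_in_locations
instance (clustering : List Int) (home_indices_in_locations : List Int) (out : List (List Int)) : Decidable (Spec_key_to_clusters clustering home_indices_in_locations out) := by unfold Spec_key_to_clusters; infer_instance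

-- ===== CLAIM (what is proved, stated in full; the proofs are below) =====
def Claim_equal_key_to_clusters : Prop := ∀ (clustering : List Int) (home_indices_in_locations : List Int), Dom_key_to_clusters clustering home_indices_in_locations → Pre_key_to_clusters clustering home_indices_in_locations → Spec_key_to_clusters clustering home_indices_in_locations (key_to_clusters clustering home_indices_in_locations)

-- ===== LEMMAS AND PROOFS =====

-- A's per-index branch (append to an existing key / start a fresh group) is exactly
-- Dict.modify with default [].
theorem step_eq_modify (d : PySem.Dict Int (List Int)) (k v : Int) :
    (if d.contains k then d.modify k [] (fun l => l ++ [v]) else d.insert k [v])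
      = d.modify k [] (fun l => l ++ [v]) := by
  by_cases hc : d.contains k
  · simp [hc]
  · simp only [Bool.not_eq_true] at hc
    simp only [hc, if_neg Bool.false_ne_true, PySem.Dict.modify,
      PySem.Dict.getD_of_not_contains _ _ hc, List.nil_append]

-- A's grouping dict, computed over the zipped pairs.
theorem dict_eq (clustering home : List Int) (hpre : clustering.length ≤ home.length) :
    ((PySem.List.pyRange 0 (PySem.List.len clustering)).foldl
      (fun d i =>
        let cluster := PySem.List.pyGetD clustering i 0
        if d.contains cluster then
          d.modify cluster [] (fun l => l ++ [PySem.List.pyGetD home i 0])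
        else
          d.insert cluster [PySem.List.pyGetD home i 0]) PySem.Dict.empty)
    = (clustering.zip home).foldl (fun d p => d.modify p.1 [] (fun l => l ++ [p.2]))
        PySem.Dict.empty := by
  have hz : (clustering.zip home).length = clustering.length := by
    simp [List.length_zip]; omega
  have hlen : PySem.List.len clustering = PySem.List.len (clustering.zip home) := by
    simp [PySem.List.len, hz]
  rw [hlen]
  rw [PySem.List.foldl_congr_mem _ _
    (fun d j => (fun d (p : Int × Int) => d.modify p.1 [] (fun l => l ++ [p.2])) d
        (PySem.List.pyGetD (clustering.zip home) j (0, 0))) _ ?_]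
  · have := PySem.List.foldl_pyRange_pyGetD (clustering.zip home) (0, 0)
      (fun d (p : Int × Int) => d.modify p.1 [] (fun l => l ++ [p.2]))
      (PySem.Dict.empty) (a := 0) le_rfl
    simpa using this
  · intro acc j hj
    beta_reduce
    rw [PySem.List.mem_pyRange_one] at hj
    have hj1 : j < ((clustering.zip home).length : Int) := by
      simpa [PySem.List.len] using hj.2
    have hjc : j < (clustering.length : Int) := by omega
    have hjh : j < (home.length : Int) := by omega
    rw [PySem.List.pyGetD_eq_getElem _ _ hj.1 hj1,
        PySem.List.pyGetD_eq_getElem _ _ hj.1 hjc,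
        PySem.List.pyGetD_eq_getElem _ _ hj.1 hjh]
    simp only [List.getElem_zip]
    exact step_eq_modify acc _ _

-- both programs compute: for each first-occurrence key, the homes of its pairs
theorem a_eq_canon (clustering home : List Int) (hpre : clustering.length ≤ home.length) :
    key_to_clusters clustering home
      = (PySem.Set.ofList clustering).map
          (fun k => ((clustering.zip home).filter (fun p => p.1 == k)).map (fun p => p.2)) := by
  simp only [key_to_clusters]
  rw [dict_eq clustering home hpre]
  set D := (clustering.zip home).foldl
      (fun d p => d.modify p.1 [] (fun l => l ++ [p.2])) PySem.Dict.empty with hDdef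
  rw [PySem.List.foldl_append_singleton_eq_map (fun key => D.getD key [])]
  have hkeys : D.keys = PySem.Set.update PySem.Dict.empty.keys ((clustering.zip home).map Prod.fst) :=
    hDdef ▸ PySem.Dict.keys_foldl_modify_key (clustering.zip home) Prod.fst []
      (fun _ p => fun l => l ++ [p.2]) PySem.Dict.empty
  rw [hkeys]
  simp only [List.nil_append, PySem.Dict.keys_empty, PySem.Set.update_nil_left,
    List.map_fst_zip hpre]
  exact List.map_congr_left (fun k _ => by
    rw [hDdef, PySem.Dict.getD_foldl_modify_append]
    simp)

theorem b_eq_canon (clustering home : List Int) :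
    key_to_clusters_alt clustering home
      = (PySem.Set.ofList clustering).map
          (fun k => ((clustering.zip home).filter (fun p => p.1 == k)).map (fun p => p.2)) := by
  unfold key_to_clusters_alt
  have hadd : (fun (ks : List Int) c => if ks.contains c then ks else ks ++ [c])
      = PySem.Set.add := by
    funext ks x
    simp [PySem.Set.add]
  rw [hadd, ← PySem.Set.ofList_eq_foldl]

-- ===== VERDICT (by name: the statement is the Claim_ definition above) =====
theorem key_to_clusters_spec : Claim_equal_key_to_clusters := by
  intro clustering home _ hpre
  unfold Spec_key_to_clusters
  rw [a_eq_canon clustering home hpre, b_eq_canon clustering home]
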